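-- pv_equiv track=rewrite | github.com/hhocquard/LaboBlayePython | Parcours6.py | enPositionGenerale
-- ===== SOURCE A (Python) =====
-- def deter(A, B, C):
--     # cette fonction prend comme arguments trois listes representant les
--     # coordonnees de trois points A, B et C, et renvoie la valeur de l'expression
--     # (XB - XA)(YC - YA) - (YB - YA)(XC - XA)
--
--     return (B[0] - A[0]) * (C[1] - A[1]) - (B[1] - A[1]) * (C[0] - A[0])
--
-- def pointsAlignes(A, B, C):
--     # cette fonction prend comme arguments trois listes representant les
--     # coordonnees de trois points A, B et C, et determine si ces points sont on non
--     # alignes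
--     #
--     # necessite la fonction deter
--
--     return deter(A, B, C) == 0
--
-- def enPositionGenerale(L):
--     # cette fonction prend comme argument une liste de listes representant
--     # les coordonnees d'un ensemble de points et determine si ces points sont
--     # ou non en position generale
--     #
--     # necessite la fonction pointsAlignes
--
--     if len(L) >= 3:
--         for i in range(len(L)):
--             for j in range(i + 1, len(L)):
--                 for k in range(j + 1, len(L)):
--                     if pointsAlignes(L[i], L[j], L[k]):
--                         return False
--     return True
-- ===== SOURCE B (Python) =====
-- def _gcd(a, b):
--     return a if b == 0 else _gcd(b, a % b)
--
-- def enPositionGenerale(L):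
--     # Per anchor point, collect normalized directions to later points in a set:
--     # a repeated direction (or a duplicate point) means three collinear points.
--     if len(L) < 3:
--         return True
--     for i, p in enumerate(L):
--         seen = set()
--         for q in L[i + 1:]:
--             dx = q[0] - p[0]
--             dy = q[1] - p[1]
--             if dx == 0 and dy == 0:
--                 return False
--             g = _gcd(dx if dx > 0 else -dx, dy if dy > 0 else -dy)
--             dx //= g
--             dy //= g
--             if dx < 0 or (dx == 0 and dy < 0):
--                 dx, dy = -dx, -dy
--             if (dx, dy) in seen:
--                 return False
--             seen.add((dx, dy))
--     return True
-- ===== Notes on version B (the rewrite author's own statement) =====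
-- stated objective: alternative
-- what changed: A tests every ordered index triple with a determinant; B, for each anchor point, collects the gcd-and-sign-normalized direction to every later point in a set and reports collinearity on a duplicate point or a repeated direction.
-- outside the precondition, e.g. on enPositionGenerale([[0, 0], [1, 1], [2, 2], [5]]): A returns False, B returns False
import Mathlib
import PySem

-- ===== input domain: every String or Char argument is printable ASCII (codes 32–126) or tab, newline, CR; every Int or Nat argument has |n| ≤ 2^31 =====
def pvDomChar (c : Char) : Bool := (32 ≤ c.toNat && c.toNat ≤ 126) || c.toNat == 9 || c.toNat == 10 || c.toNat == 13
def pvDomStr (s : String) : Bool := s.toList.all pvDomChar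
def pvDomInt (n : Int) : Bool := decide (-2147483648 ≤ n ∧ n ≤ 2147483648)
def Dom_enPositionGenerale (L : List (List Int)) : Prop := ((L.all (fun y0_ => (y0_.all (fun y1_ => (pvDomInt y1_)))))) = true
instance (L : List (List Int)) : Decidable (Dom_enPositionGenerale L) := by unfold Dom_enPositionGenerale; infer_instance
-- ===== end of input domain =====

-- B replaces A's scan of all index triples by a per-anchor set of gcd-normalized
-- directions to later points (a repeated direction or a duplicate point = collinear triple).

-- ===== PORT A =====
-- deter(A, B, C); points are indexed only at valid positions under Pre_, so pyGetD's default is never used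
def pvDeter (A B C : List Int) : Int :=
  (PySem.List.pyGetD B 0 0 - PySem.List.pyGetD A 0 0) * (PySem.List.pyGetD C 1 0 - PySem.List.pyGetD A 1 0)
    - (PySem.List.pyGetD B 1 0 - PySem.List.pyGetD A 1 0) * (PySem.List.pyGetD C 0 0 - PySem.List.pyGetD A 0 0)

-- pointsAlignes(A, B, C)
def pvAlignes (A B C : List Int) : Bool := pvDeter A B C == 0

-- the triple loop with its early 'return False' is the all-quantifier over ordered index triples
def enPositionGenerale (L : List (List Int)) : Bool :=
  if 3 ≤ L.length then
    (PySem.List.pyRange 0 (L.length : Int) 1).all fun i =>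
      (PySem.List.pyRange (i + 1) (L.length : Int) 1).all fun j =>
        (PySem.List.pyRange (j + 1) (L.length : Int) 1).all fun k =>
          ! pvAlignes (PySem.List.pyGetD L i []) (PySem.List.pyGetD L j []) (PySem.List.pyGetD L k [])
  else true

-- ===== PORT B =====
-- _gcd(a, b) from Source B (Euclid on Python's %)
def pvGcdB (a b : Int) : Int :=
  if h : b = 0 then a else pvGcdB b (PySem.Int.mod a b)
termination_by b.natAbs
decreasing_by
  rcases lt_or_gt_of_ne h with hb | hb
  · have := PySem.Int.mod_neg_bounds a hb; omega
  · have h1 := PySem.Int.mod_nonneg a hb; have h2 := PySem.Int.mod_lt a hb; omega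

-- inner 'for q in L[i+1:]' loop of Source B, with its 'seen' set and early returns
def pvScan (p : List Int) : List (List Int) → PySem.Set (Int × Int) → Bool
  | [], _ => true
  | q :: qs, seen =>
    let dx := PySem.List.pyGetD q 0 0 - PySem.List.pyGetD p 0 0
    let dy := PySem.List.pyGetD q 1 0 - PySem.List.pyGetD p 1 0
    if dx = 0 ∧ dy = 0 then false
    else
      let g := pvGcdB (if dx > 0 then dx else -dx) (if dy > 0 then dy else -dy)
      let dx' := PySem.Int.floordiv dx g
      let dy' := PySem.Int.floordiv dy g
      let d := if dx' < 0 ∨ (dx' = 0 ∧ dy' < 0) then (-dx', -dy') else (dx', dy')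
      if PySem.Set.contains seen d then false
      else pvScan p qs (PySem.Set.add seen d)

-- outer 'for i, p in enumerate(L)' loop: each anchor p with the points after it
def pvOuter : List (List Int) → Bool
  | [] => true
  | p :: qs => pvScan p qs PySem.Set.empty && pvOuter qs

def enPositionGenerale_alt (L : List (List Int)) : Bool :=
  if L.length < 3 then true else pvOuter L

-- ===== PRECONDITION & SPEC =====
-- Pre_ excludes lists of ≥ 3 points containing a point with fewer than 2 coordinates:
-- there A in general raises IndexError, and returning False before reaching the short
-- point is an accident of A's scan order.
def Pre_enPositionGenerale (L : List (List Int)) : Prop :=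
  3 ≤ L.length → ∀ p ∈ L, 2 ≤ p.length
instance (L : List (List Int)) : Decidable (Pre_enPositionGenerale L) := by unfold Pre_enPositionGenerale; infer_instance

def pvWitness_enPositionGenerale : List (List Int) := [[0, 0], [1, 0], [0, 1]]

def Spec_enPositionGenerale (L : List (List Int)) (out : Bool) : Prop := out = enPositionGenerale_alt L
instance (L : List (List Int)) (out : Bool) : Decidable (Spec_enPositionGenerale L out) := by unfold Spec_enPositionGenerale; infer_instance

-- ===== CLAIM (what is proved, stated in full; the proofs are below) =====
def Claim_equal_enPositionGenerale : Prop := ∀ (L : List (List Int)), Dom_enPositionGenerale L → Pre_enPositionGenerale L → Spec_enPositionGenerale L (enPositionGenerale L)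

-- ===== LEMMAS AND PROOFS =====

-- the direction vector from p to q, as both programs read it (first two coordinates)
def pvVec (p q : List Int) : Int × Int :=
  (PySem.List.pyGetD q 0 0 - PySem.List.pyGetD p 0 0,
   PySem.List.pyGetD q 1 0 - PySem.List.pyGetD p 1 0)

def pvCross (u v : Int × Int) : Int := u.1 * v.2 - u.2 * v.1

theorem pvGcdB_eq_gcd (a b : Int) : 0 ≤ a → 0 ≤ b → pvGcdB a b = (Int.gcd a b : Int) := by
  induction a, b using pvGcdB.induct with
  | case1 a =>
    intro ha _; rw [pvGcdB]; simp [Int.gcd, Int.natAbs_of_nonneg ha]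
  | case2 a b h ih =>
    intro ha hb
    have hbpos : 0 < b := lt_of_le_of_ne hb (Ne.symm h)
    rw [pvGcdB]; simp only [h, dite_false]
    rw [PySem.Int.mod_eq_emod_of_pos hbpos] at *
    rw [ih hb (Int.emod_nonneg a h)]
    rw [← Int.gcd_emod a b, Int.gcd_comm]

theorem pvCop (a b c d : Int) (hab : Int.gcd a b = 1) (hcd : Int.gcd c d = 1) (h : a * d = b * c) :
    (a = c ∧ b = d) ∨ (a = -c ∧ b = -d) := by
  have cab : IsCoprime a b := Int.isCoprime_iff_gcd_eq_one.mpr hab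
  have ccd : IsCoprime c d := Int.isCoprime_iff_gcd_eq_one.mpr hcd
  have hac : a ∣ c := cab.dvd_of_dvd_mul_right ⟨d, by linarith⟩
  have hca : c ∣ a := ccd.dvd_of_dvd_mul_right ⟨b, by linarith⟩
  have : a.natAbs = c.natAbs :=
    Nat.dvd_antisymm (Int.natAbs_dvd_natAbs.mpr hac) (Int.natAbs_dvd_natAbs.mpr hca)
  by_cases ha : a = 0
  · have hc : c = 0 := by omega
    have hb : b.natAbs = 1 := by simpa [ha, Int.gcd] using hab
    have hd : d.natAbs = 1 := by simpa [hc, Int.gcd] using hcd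
    subst ha hc; rcases Int.natAbs_eq_iff.mp hb with hb | hb <;> rcases Int.natAbs_eq_iff.mp hd with hd | hd <;>
      subst hb hd <;> simp_all
  · have : a = c ∨ a = -c := by omega
    rcases this with rfl | rfl
    · left; exact ⟨rfl, by have := mul_left_cancel₀ ha (show a * d = a * b by linarith); omega⟩
    · right; exact ⟨by ring, by have := mul_left_cancel₀ (show -c ≠ 0 from ha) (show -c * d = -c * (-b) by ring_nf; linarith); omega⟩

def pvCanon (u : Int × Int) : Int × Int :=
  let g := pvGcdB (if u.1 > 0 then u.1 else -u.1) (if u.2 > 0 then u.2 else -u.2)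
  let dx' := PySem.Int.floordiv u.1 g
  let dy' := PySem.Int.floordiv u.2 g
  if dx' < 0 ∨ (dx' = 0 ∧ dy' < 0) then (-dx', -dy') else (dx', dy')

def pvPosrep (x y : Int) : Int × Int :=
  if x < 0 ∨ (x = 0 ∧ y < 0) then (-x, -y) else (x, y)

theorem pvCanon_eq (a b : Int) (h : ¬(a = 0 ∧ b = 0)) :
    pvCanon (a, b) = pvPosrep (a / (Int.gcd a b : Int)) (b / (Int.gcd a b : Int)) := by
  have hg : 0 < Int.gcd a b := by
    rcases Nat.eq_zero_or_pos (Int.gcd a b) with h0 | h0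
    · exact absurd (Int.gcd_eq_zero_iff.mp h0) (by tauto)
    · exact h0
  have e1 : (if a > 0 then a else -a) = ((a.natAbs : Nat) : Int) := by split_ifs <;> omega
  have e2 : (if b > 0 then b else -b) = ((b.natAbs : Nat) : Int) := by split_ifs <;> omega
  show pvPosrep _ _ = _
  rw [e1, e2, pvGcdB_eq_gcd _ _ (by positivity) (by positivity)]
  have e3 : Int.gcd (a.natAbs : Int) (b.natAbs : Int) = Int.gcd a b := by
    simp [Int.gcd, Int.natAbs_abs]
  rw [e3, PySem.Int.floordiv_eq_ediv_of_pos (by exact_mod_cast hg),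
      PySem.Int.floordiv_eq_ediv_of_pos (by exact_mod_cast hg)]

theorem pvPosrep_neg (x y : Int) : pvPosrep (-x) (-y) = pvPosrep x y ∨ (x = 0 ∧ y = 0) := by
  unfold pvPosrep; split_ifs <;> simp [Prod.ext_iff] <;> omega

theorem pvCanon_eq_iff (u v : Int × Int) (hu : u ≠ (0, 0)) (hv : v ≠ (0, 0)) :
    (pvCanon u = pvCanon v) ↔ u.1 * v.2 - u.2 * v.1 = 0 := by
  obtain ⟨a, b⟩ := u
  obtain ⟨c, d⟩ := v
  have hu' : ¬(a = 0 ∧ b = 0) := by simpa [Prod.ext_iff] using hu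
  have hv' : ¬(c = 0 ∧ d = 0) := by simpa [Prod.ext_iff] using hv
  have hg1 : 0 < Int.gcd a b := by
    rcases Nat.eq_zero_or_pos (Int.gcd a b) with h0 | h0
    · exact absurd (Int.gcd_eq_zero_iff.mp h0) hu'
    · exact h0
  have hg2 : 0 < Int.gcd c d := by
    rcases Nat.eq_zero_or_pos (Int.gcd c d) with h0 | h0
    · exact absurd (Int.gcd_eq_zero_iff.mp h0) hv'
    · exact h0
  rw [pvCanon_eq a b hu', pvCanon_eq c d hv']
  set g1 : Int := (Int.gcd a b : Int) with hg1def
  set g2 : Int := (Int.gcd c d : Int) with hg2def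
  have hg1p : (0 : Int) < g1 := by rw [hg1def]; exact_mod_cast hg1
  have hg2p : (0 : Int) < g2 := by rw [hg2def]; exact_mod_cast hg2
  have ea : a / g1 * g1 = a := Int.ediv_mul_cancel (Int.gcd_dvd_left a b)
  have eb : b / g1 * g1 = b := Int.ediv_mul_cancel (Int.gcd_dvd_right a b)
  have ec : c / g2 * g2 = c := Int.ediv_mul_cancel (Int.gcd_dvd_left c d)
  have ed : d / g2 * g2 = d := Int.ediv_mul_cancel (Int.gcd_dvd_right c d)
  have cop1 : Int.gcd (a / g1) (b / g1) = 1 := Int.gcd_div_gcd_div_gcd hg1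
  have cop2 : Int.gcd (c / g2) (d / g2) = 1 := Int.gcd_div_gcd_div_gcd hg2
  have hcd1 : ¬(c / g2 = 0 ∧ d / g2 = 0) := by
    rintro ⟨h1, h2⟩; exact hv' ⟨by rw [← ec, h1, zero_mul], by rw [← ed, h2, zero_mul]⟩
  generalize hA : a / g1 = A at *
  generalize hB : b / g1 = B at *
  generalize hC : c / g2 = C at *
  generalize hD : d / g2 = D at *
  show pvPosrep A B = pvPosrep C D ↔ a * d - b * c = 0
  constructor
  · intro h
    have hd' : (A = C ∧ B = D) ∨ (A = -C ∧ B = -D) := by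
      unfold pvPosrep at h; split_ifs at h <;> simp [Prod.ext_iff] at h <;> omega
    rw [← ea, ← eb, ← ec, ← ed]
    rcases hd' with ⟨h1, h2⟩ | ⟨h1, h2⟩ <;> rw [h1, h2] <;> ring
  · intro h
    rw [← ea, ← eb, ← ec, ← ed] at h
    have key : A * D = B * C := by
      have h0 : (A * D - B * C) * (g1 * g2) = 0 := by linear_combination h
      have hne : g1 * g2 ≠ 0 := mul_ne_zero (ne_of_gt hg1p) (ne_of_gt hg2p)
      have := (mul_eq_zero.mp h0).resolve_right hne
      linarith
    rcases pvCop _ _ _ _ cop1 cop2 key with ⟨h1, h2⟩ | ⟨h1, h2⟩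
    · rw [h1, h2]
    · rw [h1, h2]
      exact (pvPosrep_neg _ _).resolve_right hcd1


-- characterization of port A: no ordered index triple is collinear
theorem pvA_true_iff (L : List (List Int)) :
    enPositionGenerale L = true ↔
      ∀ i j k : Nat, i < j → j < k → k < L.length →
        pvCross (pvVec (L.getD i []) (L.getD j [])) (pvVec (L.getD i []) (L.getD k [])) ≠ 0 := by
  unfold enPositionGenerale
  by_cases h3 : 3 ≤ L.length
  · rw [if_pos h3]
    simp only [List.all_eq_true, PySem.List.mem_pyRange_one, pvAlignes, Bool.not_eq_true',
      beq_eq_false_iff_ne, ne_eq]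
    constructor
    · intro H i j k hij hjk hk
      have := H ↑i ⟨by omega, by omega⟩ ↑j ⟨by omega, by omega⟩ ↑k ⟨by omega, by omega⟩
      simpa [pvDeter, pvCross, pvVec] using this
    · intro H i hi j hj k hk
      have hi' : i = ((i.toNat : Nat) : Int) := by omega
      have hj' : j = ((j.toNat : Nat) : Int) := by omega
      have hk' : k = ((k.toNat : Nat) : Int) := by omega
      rw [hi', hj', hk', PySem.List.pyGetD_natCast, PySem.List.pyGetD_natCast,
        PySem.List.pyGetD_natCast]
      have := H i.toNat j.toNat k.toNat (by omega) (by omega) (by omega)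
      simpa [pvDeter, pvCross, pvVec] using this
  · rw [if_neg h3]
    constructor
    · intro _ i j k hij hjk hk; omega
    · intro _; rfl

-- one unfolding step of pvScan, with the computed direction recognized as pvCanon (pvVec p q)
theorem pvScan_cons (p q : List Int) (qs : List (List Int)) (seen : PySem.Set (Int × Int)) :
    pvScan p (q :: qs) seen =
      (if pvVec p q = (0, 0) then false
       else if PySem.Set.contains seen (pvCanon (pvVec p q)) then false
       else pvScan p qs (PySem.Set.add seen (pvCanon (pvVec p q)))) := by
  simp only [pvScan]
  by_cases h1 : (PySem.List.pyGetD q 0 0 - PySem.List.pyGetD p 0 0) = 0 ∧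
      (PySem.List.pyGetD q 1 0 - PySem.List.pyGetD p 1 0) = 0
  · rw [if_pos h1, if_pos (show pvVec p q = (0, 0) from Prod.ext_iff.mpr ⟨h1.1, h1.2⟩)]
  · rw [if_neg h1, if_neg (show ¬ pvVec p q = (0, 0) from
      fun hz => h1 ⟨congrArg Prod.fst hz, congrArg Prod.snd hz⟩)]
    rfl

-- characterization of pvScan: no duplicate of p, all normalized directions distinct and fresh
theorem pvScan_true_iff (p : List Int) (qs : List (List Int)) :
    ∀ seen : PySem.Set (Int × Int), pvScan p qs seen = true ↔
      ((∀ q ∈ qs, pvVec p q ≠ (0, 0)) ∧ (qs.map (fun q => pvCanon (pvVec p q))).Nodup ∧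
        (∀ q ∈ qs, pvCanon (pvVec p q) ∉ seen)) := by
  induction qs with
  | nil => intro seen; simp [pvScan]
  | cons q qs ih =>
    intro seen
    rw [pvScan_cons]
    simp only [List.map_cons]
    split_ifs with h1 h2
    · simp only [false_iff]
      rintro ⟨hd, -, -⟩
      exact hd q List.mem_cons_self h1
    · simp only [false_iff]
      rintro ⟨-, -, hf⟩
      exact hf q List.mem_cons_self ((PySem.Set.contains_iff _ _).mp h2)
    · rw [ih]
      constructor
      · rintro ⟨hd, hn, hf⟩
        refine ⟨?_, ?_, ?_⟩
        · intro r hr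
          rcases List.mem_cons.mp hr with rfl | hr
          · exact h1
          · exact hd r hr
        · refine List.nodup_cons.mpr ⟨?_, hn⟩
          intro hmem
          rcases List.mem_map.mp hmem with ⟨r, hr, hrq⟩
          exact hf r hr ((PySem.Set.mem_add _ _ _).mpr (Or.inr hrq))
        · intro r hr
          rcases List.mem_cons.mp hr with rfl | hr
          · exact fun hm => h2 ((PySem.Set.contains_iff _ _).mpr hm)
          · exact fun hm => hf r hr ((PySem.Set.mem_add _ _ _).mpr (Or.inl hm))
      · rintro ⟨hd, hn, hf⟩
        refine ⟨fun r hr => hd r (List.mem_cons_of_mem _ hr), (List.nodup_cons.mp hn).2, ?_⟩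
        intro r hr hm
        rcases (PySem.Set.mem_add _ _ _).mp hm with hm | hm
        · exact hf r (List.mem_cons_of_mem _ hr) hm
        · exact (List.nodup_cons.mp hn).1 (by rw [← hm]; exact List.mem_map.mpr ⟨r, hr, rfl⟩)

-- characterization of pvOuter
theorem pvOuter_true_iff (L : List (List Int)) :
    pvOuter L = true ↔
      ∀ i : Nat, i < L.length →
        ((∀ q ∈ L.drop (i + 1), pvVec (L.getD i []) q ≠ (0, 0)) ∧
          ((L.drop (i + 1)).map (fun q => pvCanon (pvVec (L.getD i []) q))).Nodup) := by
  induction L with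
  | nil => simp [pvOuter]
  | cons p qs ih =>
    simp only [pvOuter, Bool.and_eq_true, ih, pvScan_true_iff]
    constructor
    · rintro ⟨⟨hs1, hs2, -⟩, ho⟩ i hi
      cases i with
      | zero => simpa using ⟨hs1, hs2⟩
      | succ j => simpa using ho j (by simpa using hi)
    · intro H
      refine ⟨?_, fun j hj => ?_⟩
      · have h0 := H 0 (by simp)
        simp at h0
        exact ⟨h0.1, h0.2, fun q _ => by simp [PySem.Set.empty]⟩
      · have := H (j + 1) (by simpa using hj)
        simpa using this

-- index form of pvOuter's condition
theorem pvB_cond_iff (L : List (List Int)) :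
    (∀ i : Nat, i < L.length →
        ((∀ q ∈ L.drop (i + 1), pvVec (L.getD i []) q ≠ (0, 0)) ∧
          ((L.drop (i + 1)).map (fun q => pvCanon (pvVec (L.getD i []) q))).Nodup)) ↔
      ((∀ i j : Nat, i < j → j < L.length → pvVec (L.getD i []) (L.getD j []) ≠ (0, 0)) ∧
        (∀ i j k : Nat, i < j → j < k → k < L.length →
          pvCanon (pvVec (L.getD i []) (L.getD j [])) ≠ pvCanon (pvVec (L.getD i []) (L.getD k [])))) := by
  have hget : ∀ (i m : Nat) (h : i + 1 + m < L.length),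
      (L.drop (i + 1))[m]'(by simp [List.length_drop]; omega) = L.getD (i + 1 + m) [] := by
    intro i m h
    rw [List.getElem_drop, List.getD_eq_getElem _ _ h]
  constructor
  · intro H
    constructor
    · intro i j hij hjl
      have hj' : i + 1 + (j - i - 1) < L.length := by omega
      have hmem : L.getD j [] ∈ L.drop (i + 1) := by
        have := hget i (j - i - 1) hj'
        rw [show i + 1 + (j - i - 1) = j by omega] at this
        exact this ▸ List.getElem_mem _
      exact (H i (by omega)).1 _ hmem
    · intro i j k hij hjk hk
      have hn := (H i (by omega)).2
      have hp := List.pairwise_iff_getElem.mp hn (j - i - 1) (k - i - 1)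
        (by simp [List.length_drop]; omega) (by simp [List.length_drop]; omega) (by omega)
      simp only [List.getElem_map] at hp
      rw [hget i (j - i - 1) (by omega), hget i (k - i - 1) (by omega)] at hp
      rw [show i + 1 + (j - i - 1) = j by omega, show i + 1 + (k - i - 1) = k by omega] at hp
      exact hp
  · rintro ⟨H1, H2⟩ i hi
    constructor
    · intro q hq
      obtain ⟨m, hm, hqe⟩ := List.mem_iff_getElem.mp hq
      have hm' : i + 1 + m < L.length := by simp [List.length_drop] at hm; omega
      rw [← hqe, hget i m hm']
      exact H1 i (i + 1 + m) (by omega) (by omega)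
    · rw [List.Nodup, List.pairwise_iff_getElem]
      intro a b ha hb hab
      simp only [List.getElem_map]
      have ha' : i + 1 + a < L.length := by simp [List.length_drop] at ha; omega
      have hb' : i + 1 + b < L.length := by simp [List.length_drop] at hb; omega
      rw [hget i a ha', hget i b hb']
      exact H2 i (i + 1 + a) (i + 1 + b) (by omega) (by omega) (by omega)

-- the bridge between A's condition and B's, for n ≥ 3
theorem pvBridge (L : List (List Int)) (h3 : 3 ≤ L.length) :
    (∀ i j k : Nat, i < j → j < k → k < L.length →
        pvCross (pvVec (L.getD i []) (L.getD j [])) (pvVec (L.getD i []) (L.getD k [])) ≠ 0) ↔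
      ((∀ i j : Nat, i < j → j < L.length → pvVec (L.getD i []) (L.getD j []) ≠ (0, 0)) ∧
        (∀ i j k : Nat, i < j → j < k → k < L.length →
          pvCanon (pvVec (L.getD i []) (L.getD j [])) ≠ pvCanon (pvVec (L.getD i []) (L.getD k [])))) := by
  constructor
  · intro H
    have Hdup : ∀ i j : Nat, i < j → j < L.length → pvVec (L.getD i []) (L.getD j []) ≠ (0, 0) := by
      intro i j hij hjl hz
      have h1 : PySem.List.pyGetD (L.getD j []) 0 0 = PySem.List.pyGetD (L.getD i []) 0 0 := by
        have := congrArg Prod.fst hz; simp only [pvVec] at this; omega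
      have h2 : PySem.List.pyGetD (L.getD j []) 1 0 = PySem.List.pyGetD (L.getD i []) 1 0 := by
        have := congrArg Prod.snd hz; simp only [pvVec] at this; omega
      rcases Nat.eq_zero_or_pos i with rfl | hipos
      · rcases Nat.lt_or_ge j 2 with hj2 | hj2
        · have hj1 : j = 1 := by omega
          subst hj1
          apply H 0 1 2 (by omega) (by omega) (by omega)
          simp only [pvCross, pvVec]
          rw [h1, h2]; ring
        · apply H 0 1 j (by omega) (by omega) hjl
          simp only [pvCross, pvVec]
          rw [h1, h2]; ring
      · apply H 0 i j hipos hij hjl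
        simp only [pvCross, pvVec]
        rw [h1, h2]; ring
    refine ⟨Hdup, ?_⟩
    intro i j k hij hjk hk hcanon
    exact H i j k hij hjk hk
      ((pvCanon_eq_iff _ _ (Hdup i j hij (by omega)) (Hdup i k (by omega) hk)).mp hcanon)
  · rintro ⟨H1, H2⟩ i j k hij hjk hk hz
    exact H2 i j k hij hjk hk
      ((pvCanon_eq_iff _ _ (H1 i j hij (by omega)) (H1 i k (by omega) hk)).mpr hz)

-- ===== VERDICT (by name: the statement is the Claim_ definition above) =====
theorem enPositionGenerale_spec : Claim_equal_enPositionGenerale := by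
  intro L _ _
  unfold Spec_enPositionGenerale enPositionGenerale_alt
  by_cases h3 : 3 ≤ L.length
  · have hA := pvA_true_iff L
    have hB := (pvOuter_true_iff L).trans (pvB_cond_iff L)
    rw [if_neg (by omega)]
    rw [← pvBridge L h3, ← hA] at hB
    cases hE : enPositionGenerale L
    · cases hO : pvOuter L
      · rfl
      · exact absurd (hA.mpr ((pvBridge L h3).mpr ((pvB_cond_iff L).mp ((pvOuter_true_iff L).mp hO)))) (by simp [hE])
    · exact (hB.mpr hE).symm
  · rw [if_pos (by omega)]
    unfold enPositionGenerale
    rw [if_neg h3]
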